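-- pv_equiv track=rewrite | github.com/slavenmerc/web-dev | CodingBat/warmup-1/front_back.py | front_back
-- ===== SOURCE A (Python) =====
-- def front_back(str):
--   if len(str)==1:
--     return str
--
--   else:
--     ans=""
--     for i in range(len(str)):
--       if i==0:
--         ans+=str[len(str)-1]
--         continue
--
--       if i==len(str)-1:
--         ans+=str[0]
--         continue
--
--       ans+=str[i]
--
--
--     return ans
-- ===== SOURCE B (Python) =====
-- def front_back(str):
--   if len(str) <= 1:
--     return str
--   return str[-1] + str[1:-1] + str[0]
-- ===== Notes on version B (the rewrite author's own statement) =====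
-- stated objective: faster
-- what changed: Replaces the character-by-character index loop with per-position branching by a single concatenation of three slices (last char, untouched middle, first char) behind a len<=1 guard.
import Mathlib
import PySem

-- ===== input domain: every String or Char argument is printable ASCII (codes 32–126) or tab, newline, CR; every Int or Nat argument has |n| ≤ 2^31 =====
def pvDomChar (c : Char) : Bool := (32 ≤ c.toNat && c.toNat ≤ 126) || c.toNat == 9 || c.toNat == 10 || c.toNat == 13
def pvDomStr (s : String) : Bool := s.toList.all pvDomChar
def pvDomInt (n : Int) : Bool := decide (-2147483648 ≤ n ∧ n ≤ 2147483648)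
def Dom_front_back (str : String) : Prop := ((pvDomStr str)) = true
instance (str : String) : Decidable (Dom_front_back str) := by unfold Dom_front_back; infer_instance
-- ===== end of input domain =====

-- B swaps first and last characters by one concatenation of three slices instead of A's index loop.

-- ===== PORT A =====
def front_back (str : String) : String :=
  if (PySem.Str.len str) == 1 then str
  else
    let cs := str.toList
    let ans := (PySem.List.pyRange 0 (PySem.Str.len str) 1).foldl (fun ans i =>
      if i == 0 then ans ++ [PySem.List.pyGetD cs ((PySem.Str.len str) - 1) ' ']
      else if i == (PySem.Str.len str) - 1 then ans ++ [PySem.List.pyGetD cs 0 ' ']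
      else ans ++ [PySem.List.pyGetD cs i ' ']) ([] : List Char)
    String.ofList ans

-- ===== PORT B =====
def front_back_alt (str : String) : String :=
  if (PySem.Str.len str) ≤ 1 then str
  else
    let cs := str.toList
    String.ofList ([PySem.List.pyGetD cs (-1) ' ']
      ++ PySem.List.slice cs (some 1) (some (-1))
      ++ [PySem.List.pyGetD cs 0 ' '])

-- ===== PRECONDITION & SPEC =====
def Spec_front_back (str : String) (out : String) : Prop := out = front_back_alt str
instance (str : String) (out : String) : Decidable (Spec_front_back str out) := by unfold Spec_front_back; infer_instance

-- ===== CLAIM (what is proved, stated in full; the proofs are below) =====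
def Claim_equal_front_back : Prop := ∀ (str : String), Dom_front_back str → Spec_front_back str (front_back str)

-- ===== LEMMAS AND PROOFS =====

lemma pv_map_swap (a b : Char) (mid : List Char) :
    (List.range (mid.length + 2)).map
      (fun k => if (k : Nat) = 0 then b
        else if (k : Nat) = mid.length + 1 then a
        else (a :: (mid ++ [b])).getD k ' ')
    = b :: (mid ++ [a]) := by
  apply List.ext_getElem
  · simp
  · intro i h1 h2
    simp only [List.getElem_map, List.getElem_range]
    simp only [List.length_map, List.length_range] at h1
    split_ifs with h0 hl
    · subst h0; simp
    · subst hl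
      rw [List.getElem_cons_succ, List.getElem_append_right (by simp)]
      simp
    · have hi : 1 ≤ i ∧ i ≤ mid.length := by omega
      rcases Nat.exists_eq_add_of_le hi.1 with ⟨j, rfl⟩
      have hj : j < mid.length := by omega
      simp only [List.getD, Nat.add_comm 1 j, List.getElem?_cons_succ,
        List.getElem_cons_succ]
      simp [List.getElem?_append_left hj, hj]

-- ===== VERDICT (by name: the statement is the Claim_ definition above) =====
theorem front_back_spec : Claim_equal_front_back := by
  intro str _
  show front_back str = front_back_alt str
  unfold front_back front_back_alt
  rcases hcs : str.toList with _ | ⟨a, rest⟩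
  · -- empty string
    have hs : str = "" := by
      have := congrArg String.ofList hcs; simpa using this
    subst hs; decide
  · rcases rest.eq_nil_or_concat with rfl | ⟨mid, b, rfl⟩
    · -- single character
      have h1 : str.length = 1 := by simpa using congrArg List.length hcs
      simp [PySem.Str.len_eq, h1]
    · -- length ≥ 2 : cs = a :: mid ++ [b]
      have hlen : PySem.Str.len str = (mid.length : Int) + 2 := by
        simp [PySem.Str.len_eq, hcs]; ring
      have hne1 : ¬ ((PySem.Str.len str == 1) = true) := by
        rw [hlen]; simp; omega
      have hle1 : ¬ (PySem.Str.len str ≤ 1) := by rw [hlen]; omega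
      rw [if_neg hne1, if_neg hle1]
      simp only [List.concat_eq_append]
      congr 1
      -- A side: fold = map
      have hfun : (fun (ans : List Char) (i : Int) =>
          if i == 0 then ans ++ [PySem.List.pyGetD (a :: (mid ++ [b])) ((PySem.Str.len str) - 1) ' ']
          else if i == (PySem.Str.len str) - 1 then ans ++ [PySem.List.pyGetD (a :: (mid ++ [b])) 0 ' ']
          else ans ++ [PySem.List.pyGetD (a :: (mid ++ [b])) i ' '])
        = (fun ans i => ans ++ [(fun i : Int =>
          if i == 0 then PySem.List.pyGetD (a :: (mid ++ [b])) ((PySem.Str.len str) - 1) ' '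
          else if i == (PySem.Str.len str) - 1 then PySem.List.pyGetD (a :: (mid ++ [b])) 0 ' '
          else PySem.List.pyGetD (a :: (mid ++ [b])) i ' ') i]) := by
        funext ans i
        simp only []
        split_ifs <;> rfl
      rw [hfun, PySem.List.foldl_append_singleton_eq_map, List.nil_append]
      rw [hlen]
      have hrange : PySem.List.pyRange 0 ((mid.length : Int) + 2) 1
          = (List.range (mid.length + 2)).map (Int.ofNat) := by
        have := PySem.List.pyRange_zero_natCast (mid.length + 2)
        push_cast at this ⊢
        simpa using this
      rw [hrange, List.map_map]
      -- B side values
      have hB : PySem.List.pyGetD (a :: (mid ++ [b])) (-1) ' ' = b := by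
        have := PySem.List.pyGetD_neg_one_append_singleton (a :: mid) b ' '
        simpa using this
      have hSlice : PySem.List.slice (a :: (mid ++ [b])) (some 1) (some (-1)) = mid := by
        simp [PySem.List.slice, PySem.List.clampIdx]
        rw [if_neg (by omega : ¬ ((mid.length : Int) + 1 < 0))]
        simp
      have hA0 : PySem.List.pyGetD (a :: (mid ++ [b])) 0 ' ' = a := by
        simp [PySem.List.pyGetD_zero_cons]
      have hAl : PySem.List.pyGetD (a :: (mid ++ [b])) ((mid.length : Int) + 2 - 1) ' ' = b := by
        have h1 : ((mid.length : Int) + 2 - 1) = ((mid.length + 1 : Nat) : Int) := by push_cast; ring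
        rw [h1, PySem.List.pyGetD_natCast]
        simp [List.getD]
      rw [hB, hSlice]
      conv_rhs => rw [hA0]
      have hmap : ∀ k ∈ List.range (mid.length + 2),
          ((fun i : Int =>
            if i == 0 then PySem.List.pyGetD (a :: (mid ++ [b])) ((mid.length : Int) + 2 - 1) ' '
            else if i == (mid.length : Int) + 2 - 1 then PySem.List.pyGetD (a :: (mid ++ [b])) 0 ' '
            else PySem.List.pyGetD (a :: (mid ++ [b])) i ' ') ∘ Int.ofNat) k
          = (fun k => if (k : Nat) = 0 then b
              else if (k : Nat) = mid.length + 1 then a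
              else (a :: (mid ++ [b])).getD k ' ') k := by
        intro k hk
        simp only [Function.comp, Int.ofNat_eq_natCast, beq_iff_eq]
        by_cases h0 : k = 0
        · simp [h0, hAl]
        · have hne0 : ¬ ((k : Int) = 0) := by exact_mod_cast h0
          by_cases hl : k = mid.length + 1
          · have heq : (k : Int) = (mid.length : Int) + 2 - 1 := by rw [hl]; push_cast; ring
            rw [if_neg hne0, if_pos heq, if_neg h0, if_pos hl, hA0]
          · have hnel : ¬ ((k : Int) = (mid.length : Int) + 2 - 1) := by
              intro h; apply hl; omega
            rw [if_neg hne0, if_neg hnel, if_neg h0, if_neg hl, PySem.List.pyGetD_natCast]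
      rw [List.map_congr_left hmap, pv_map_swap]
      simp
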